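-- pv_equiv track=rewrite | github.com/Jin-bao/Project-Euler | Python/P081-路径和：两个方向.py | transform
-- ===== SOURCE A (Python) =====
-- def transform(matrix:list) -> list:
--   matrix_prime = []
--   order = len(matrix)
--
--   for l in range(2*order-1):
--     line_temp = []
--     if l>=order:
--       i = order-1; j = l-order+1
--       while j<order:
--         line_temp += [matrix[i][j]]
--         i -= 1; j += 1
--     else:
--       i = l; j = 0
--       while i>=0:
--         line_temp += [matrix[i][j]]
--         i -= 1; j += 1
--     matrix_prime += [line_temp]
--
--   return order, matrix_prime
-- ===== SOURCE B (Python) =====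
-- def transform(matrix: list) -> list:
--     order = len(matrix)
--     matrix_prime = [[] for _ in range(2 * order - 1)]
--     for i in range(order - 1, -1, -1):
--         for j in range(order):
--             matrix_prime[i + j].append(matrix[i][j])
--     return order, matrix_prime
-- ===== Notes on version B (the rewrite author's own statement) =====
-- stated objective: simpler
-- what changed: Replaces A's per-diagonal gather (upper/lower branch with hand-maintained i,j while-loops and per-element list concatenation) by a single scatter pass: pre-allocate 2*order-1 empty diagonals and append matrix[i][j] to diagonal i+j, iterating rows bottom-to-top to keep A's decreasing-row order inside each diagonal.
import Mathlib
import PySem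

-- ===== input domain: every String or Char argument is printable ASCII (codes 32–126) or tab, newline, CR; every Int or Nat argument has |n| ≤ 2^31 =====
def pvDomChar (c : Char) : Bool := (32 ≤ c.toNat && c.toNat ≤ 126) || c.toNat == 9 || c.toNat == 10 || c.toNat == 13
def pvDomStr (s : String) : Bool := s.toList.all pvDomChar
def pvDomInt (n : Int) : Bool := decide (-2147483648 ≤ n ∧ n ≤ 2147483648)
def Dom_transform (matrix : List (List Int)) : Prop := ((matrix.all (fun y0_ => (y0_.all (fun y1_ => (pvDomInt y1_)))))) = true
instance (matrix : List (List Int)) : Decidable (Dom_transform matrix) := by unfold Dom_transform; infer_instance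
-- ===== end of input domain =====

-- B replaces A's per-diagonal gather (branch + two while-loops) by a single scatter pass over
-- rows bottom-to-top, appending matrix[i][j] to diagonal i+j (objective: simpler).

-- ===== PORT A =====
-- matrix[i][j]; total form of the double indexing, exact under Pre_transform (both indices in range there)
def cellAt (m : List (List Int)) (i j : Int) : Int :=
  PySem.List.pyGetD (PySem.List.pyGetD m i []) j 0

-- A's while-loops: fuel = the number of iterations the loop performs; i decreases, j increases
def gatherA (m : List (List Int)) : Nat → Int → Int → List Int
  | 0, _, _ => []
  | fuel+1, i, j => cellAt m i j :: gatherA m fuel (i-1) (j+1)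

def transform (matrix : List (List Int)) : Int × List (List Int) :=
  let order : Int := matrix.length
  (order,
    (PySem.List.pyRange 0 (2*order-1) 1).map (fun l =>
      if l ≥ order then gatherA matrix (2*order-1-l).toNat (order-1) (l-order+1)
      else gatherA matrix (l+1).toNat l 0))

-- ===== PORT B =====
-- matrix_prime[k].append(v)
def appendAt (xs : List (List Int)) (k : Int) (v : Int) : List (List Int) :=
  PySem.List.pySetD xs k (PySem.List.pyGetD xs k [] ++ [v])

def transform_alt (matrix : List (List Int)) : Int × List (List Int) :=
  let order : Int := matrix.length
  let init : List (List Int) := (PySem.List.pyRange 0 (2*order-1) 1).map (fun _ => ([] : List Int))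
  (order,
    (PySem.List.pyRange (order-1) (-1) (-1)).foldl (fun acc i =>
      (PySem.List.pyRange 0 order 1).foldl (fun acc j =>
        appendAt acc (i+j) (cellAt matrix i j)) acc) init)

-- ===== PRECONDITION & SPEC =====
-- A raises IndexError when some row is shorter than the matrix (every cell (i,j), i,j < len, is read)
def Pre_transform (matrix : List (List Int)) : Prop :=
  ∀ row ∈ matrix, matrix.length ≤ row.length
instance (matrix : List (List Int)) : Decidable (Pre_transform matrix) := by
  unfold Pre_transform; infer_instance
def pvWitness_transform : List (List Int) := [[1, 2], [3, 4]]

def Spec_transform (matrix : List (List Int)) (out : Int × List (List Int)) : Prop := out = transform_alt matrix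
instance (matrix : List (List Int)) (out : Int × List (List Int)) : Decidable (Spec_transform matrix out) := by unfold Spec_transform; infer_instance

-- ===== CLAIM (what is proved, stated in full; the proofs are below) =====
def Claim_equal_transform : Prop := ∀ (matrix : List (List Int)), Dom_transform matrix → Pre_transform matrix → Spec_transform matrix (transform matrix)

-- ===== LEMMAS AND PROOFS =====

-- A's inner loop in closed form
theorem gatherA_eq (m : List (List Int)) (fuel : Nat) (i j : Int) :
    gatherA m fuel i j
      = (List.range fuel).map (fun t : Nat => cellAt m (i - (t:Int)) (j + (t:Int))) := by
  induction fuel generalizing i j with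
  | zero => simp [gatherA]
  | succ f ih =>
    rw [List.range_succ_eq_map]
    simp only [gatherA, ih, List.map_cons, Nat.cast_zero, sub_zero, add_zero, List.map_map]
    refine List.cons_eq_cons.mpr ⟨rfl, List.map_congr_left ?_⟩
    intro t _
    simp only [Function.comp]
    congr 1 <;> push_cast <;> ring

-- interval filter of a range is a shifted range
theorem filter_range_interval (a b n : Nat) :
    (List.range n).filter (fun k => decide (a ≤ k ∧ k < b))
      = (List.range (min b n - a)).map (fun t => a + t) := by
  induction n with
  | zero => simp
  | succ n ih =>
    rw [List.range_succ, List.filter_append, ih]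
    by_cases h : a ≤ n ∧ n < b
    · have h1 : min b (n+1) - a = (min b n - a) + 1 := by omega
      rw [h1, List.range_succ, List.map_append]
      simp only [List.filter_cons, List.filter_nil, decide_eq_true_eq, h, List.map_cons, List.map_nil]
      have : a + (min b n - a) = n := by omega
      simp [this]
    · have h1 : min b (n+1) - a = min b n - a := by omega
      simp only [List.filter_cons, List.filter_nil, decide_eq_true_eq, h, h1]
      simp

theorem length_appendAt (xs : List (List Int)) (k v) : (appendAt xs k v).length = xs.length := by
  simp [appendAt, PySem.List.length_pySetD]

theorem getD_appendAt (xs : List (List Int)) (k : Nat) (v : Int) (d : Nat) (hk : k < xs.length) :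
    (appendAt xs (k : Int) v).getD d [] = if d = k then xs.getD d [] ++ [v] else xs.getD d [] := by
  simp only [appendAt, PySem.List.pySetD_natCast, PySem.List.pyGetD_natCast]
  simp only [List.getD, List.getElem?_set]
  by_cases h : d = k
  · subst h; simp [hk]
  · simp [h, Ne.symm h]

theorem inner_fold (m : List (List Int)) (i : Int) (b : Nat) (acc : List (List Int))
    (hi : 0 ≤ i) (hib : i.toNat + b ≤ acc.length) :
    (((PySem.List.pyRange 0 (b : Int) 1).foldl
        (fun acc j => appendAt acc (i+j) (cellAt m i j)) acc).length = acc.length)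
    ∧ ∀ d : Nat, d < acc.length →
      ((PySem.List.pyRange 0 (b : Int) 1).foldl
        (fun acc j => appendAt acc (i+j) (cellAt m i j)) acc).getD d []
      = if i ≤ (d : Int) ∧ (d : Int) < i + b then acc.getD d [] ++ [cellAt m i ((d : Int) - i)]
        else acc.getD d [] := by
  induction b with
  | zero =>
    rw [PySem.List.pyRange_one_eq_nil (by simp)]
    refine ⟨rfl, fun d hd => ?_⟩
    rw [List.foldl_nil, if_neg (by push_cast; omega)]
  | succ b ih =>
    obtain ⟨ihlen, ihget⟩ := ih (by omega)
    have hb : ((b+1:Nat):Int) = (b:Int)+1 := by push_cast; ring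
    rw [hb, PySem.List.pyRange_one_succ_right (by positivity), List.foldl_append,
        List.foldl_cons, List.foldl_nil]
    have hk : (i + (b:Int)) = ((i.toNat + b : Nat):Int) := by omega
    refine ⟨by rw [hk, length_appendAt, ihlen], fun d hd => ?_⟩
    rw [hk, getD_appendAt _ _ _ _ (by rw [ihlen]; omega), ihget d hd]
    by_cases hdk : d = i.toNat + b
    · rw [if_pos hdk, if_neg (by omega), if_pos (by omega)]
      have : ((d:Int) - i) = (b:Int) := by omega
      rw [this]
    · rw [if_neg hdk]
      by_cases hc : i ≤ (d:Int) ∧ (d:Int) < i + b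
      · rw [if_pos hc, if_pos (by omega)]
      · rw [if_neg hc, if_neg (by omega)]

theorem outer_fold (m : List (List Int)) (n : Nat) (R : List Int) (acc : List (List Int))
    (hR : ∀ r ∈ R, 0 ≤ r ∧ r.toNat + n ≤ acc.length) :
    ((R.foldl (fun acc i => (PySem.List.pyRange 0 (n : Int) 1).foldl
        (fun acc j => appendAt acc (i+j) (cellAt m i j)) acc) acc).length = acc.length)
    ∧ ∀ d : Nat, d < acc.length →
      (R.foldl (fun acc i => (PySem.List.pyRange 0 (n : Int) 1).foldl
        (fun acc j => appendAt acc (i+j) (cellAt m i j)) acc) acc).getD d []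
      = acc.getD d []
        ++ (R.filter (fun r => decide (r ≤ (d : Int) ∧ (d : Int) < r + n))).map
             (fun r => cellAt m r ((d : Int) - r)) := by
  induction R generalizing acc with
  | nil => exact ⟨rfl, fun d hd => by simp⟩
  | cons r R ih =>
    obtain ⟨hr0, hrn⟩ := hR r (List.mem_cons_self)
    obtain ⟨ilen, iget⟩ := inner_fold m r n acc hr0 hrn
    obtain ⟨olen, oget⟩ := ih ((PySem.List.pyRange 0 (n : Int) 1).foldl
        (fun acc j => appendAt acc (r+j) (cellAt m r j)) acc)
      (fun x hx => ⟨(hR x (List.mem_cons_of_mem r hx)).1,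
        by rw [ilen]; exact (hR x (List.mem_cons_of_mem r hx)).2⟩)
    rw [ilen] at olen oget
    refine ⟨by rw [List.foldl_cons, olen], fun d hd => ?_⟩
    rw [List.foldl_cons, oget d hd, iget d hd, List.filter_cons]
    by_cases hc : r ≤ (d:Int) ∧ (d:Int) < r + n
    · rw [if_pos hc, if_pos (by simpa using hc), List.map_cons, List.append_cons,
          List.append_assoc]
      simp
    · rw [if_neg hc, if_neg (by simpa using hc)]

-- one diagonal: A's gathered line equals B's scatter content at index d
theorem line_eq (m : List (List Int)) (d : Nat) (_hd : d < 2*m.length-1) :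
    (if ((d:Int) ≥ (m.length:Int)) then
        gatherA m (2*(m.length:Int)-1-(d:Int)).toNat ((m.length:Int)-1) ((d:Int)-(m.length:Int)+1)
      else gatherA m ((d:Int)+1).toNat (d:Int) 0)
    = ((((List.range m.length).map
          (fun k : Nat => (m.length:Int)-1-(k:Int))).filter
        (fun r => decide (r ≤ (d:Int) ∧ (d:Int) < r + (m.length:Int)))).map
        (fun r => cellAt m r ((d:Int) - r))) := by
  rw [List.filter_map, List.filter_congr
        (q := fun k : Nat => decide ((m.length-1-d : Nat) ≤ k ∧ k < 2*m.length-1-d))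
        (fun k hk => by
          have hk' : k < m.length := List.mem_range.mp hk
          simp only [Function.comp]
          rw [decide_eq_decide]
          omega),
      filter_range_interval, List.map_map, List.map_map]
  by_cases hcase : (d:Int) ≥ (m.length:Int)
  · rw [if_pos hcase]
    have hc1 : (2*(m.length:Int)-1-(d:Int)).toNat = 2*m.length-1-d := by omega
    have hc2 : min (2*m.length-1-d) m.length - (m.length-1-d) = 2*m.length-1-d := by omega
    rw [hc1, hc2, gatherA_eq]
    refine List.map_congr_left fun t ht => ?_
    have ht' : t < 2*m.length-1-d := List.mem_range.mp ht
    simp only [Function.comp]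
    congr 1 <;> omega
  · rw [if_neg hcase]
    have hc1 : ((d:Int)+1).toNat = d+1 := by omega
    have hc2 : min (2*m.length-1-d) m.length - (m.length-1-d) = d+1 := by omega
    rw [hc1, hc2, gatherA_eq]
    refine List.map_congr_left fun t ht => ?_
    have ht' : t < d+1 := List.mem_range.mp ht
    simp only [Function.comp]
    congr 1 <;> omega

-- ===== VERDICT (by name: the statement is the Claim_ definition above) =====
theorem transform_spec : Claim_equal_transform := by
  intro matrix _ _
  unfold Spec_transform
  simp only [transform, transform_alt]
  rw [PySem.List.pyRange_one 0 (2*(matrix.length:Int)-1), PySem.List.pyRange_neg_one]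
  have hN : ((2*(matrix.length:Int)-1) - 0).toNat = (2*(matrix.length:Int)-1).toNat := by omega
  set n := matrix.length with hn
  set N := (2*(n:Int)-1).toNat with hNdef
  have hNn : N = 2*n-1 := by omega
  have hinitlen : ((List.range ((2*(n:Int)-1) - 0).toNat).map
      (fun _ => ([] : List Int))).length = N := by
    simp; omega
  obtain ⟨olen, oget⟩ := outer_fold matrix n
      ((List.range n).map (fun k : Nat => (n:Int)-1-(k:Int)))
      ((List.range ((2*(n:Int)-1) - 0).toNat).map (fun _ => ([] : List Int)))
      (fun r hr => by
        obtain ⟨k, hk, rfl⟩ := List.mem_map.mp hr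
        have := List.mem_range.mp hk
        constructor <;> [omega; (rw [hinitlen]; omega)])
  have hrows' : ((n:Int)-1-(-1)).toNat = n := by omega
  have hinit : (List.map (fun _ => ([]:List Int))
      (List.map (fun k : Nat => (0:Int) + (k:Int)) (List.range ((2*(n:Int)-1) - 0).toNat)))
      = List.map (fun _ => ([]:List Int)) (List.range ((2*(n:Int)-1) - 0).toNat) := by
    simp [Function.comp_def]
  rw [hrows', hinit]
  refine congrArg (Prod.mk ((n:Int))) ?_
  apply List.ext_getElem
  · rw [olen]
    simp
  · intro d hd1 hd2
    have hdN : d < N := by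
      simp at hd1
      omega
    have hdinit : d < ((List.range ((2*(n:Int)-1) - 0).toNat).map
        (fun _ => ([] : List Int))).length := by rw [hinitlen]; exact hdN
    rw [← List.getD_eq_getElem _ ([] : List Int) hd2, oget d hdinit]
    have hinit0 : ((List.range ((2*(n:Int)-1) - 0).toNat).map
        (fun _ => ([] : List Int))).getD d [] = [] := by
      rw [List.getD_eq_getElem _ _ hdinit, List.getElem_map]
    rw [hinit0, List.nil_append, List.getElem_map, List.getElem_map, List.getElem_range]
    rw [hn] at hNn ⊢
    simp only [zero_add]
    exact line_eq matrix d (by omega)
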